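-- pv_equiv track=rewrite | github.com/mrtimber425/netops-workbench | src/netops/core/vlsm.py | hosts_to_prefix
-- ===== SOURCE A (Python) =====
-- def hosts_to_prefix(hosts: int) -> int:
--     # required addresses include network+broadcast (except /31)
--     needed = hosts + 2 if hosts > 0 else 0
--     prefix = 32
--     size = 1
--     while size < needed and prefix > 0:
--         size <<= 1
--         prefix -= 1
--     # cap at /30 to keep >0 usable; /31 reserved for ptp (not auto here)
--     if prefix > 30:
--         prefix = 30
--     return prefix
-- ===== SOURCE B (Python) =====
-- def hosts_to_prefix(hosts: int) -> int:
--     # hosts <= 0: no usable range requested; keep the /30 floor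
--     if hosts <= 0:
--         return 30
--     # smallest k with 2**k >= hosts + 2, clamped to 32 block bits
--     k = min((hosts + 1).bit_length(), 32)
--     return 32 - k
-- ===== Notes on version B (the rewrite author's own statement) =====
-- stated objective: idiomatic
-- what changed: Replaces the doubling while-loop with a closed-form bit_length computation (smallest k with 2^k >= hosts+2, clamped to 32) and an early return of the /30 floor for hosts <= 0.
import Mathlib
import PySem

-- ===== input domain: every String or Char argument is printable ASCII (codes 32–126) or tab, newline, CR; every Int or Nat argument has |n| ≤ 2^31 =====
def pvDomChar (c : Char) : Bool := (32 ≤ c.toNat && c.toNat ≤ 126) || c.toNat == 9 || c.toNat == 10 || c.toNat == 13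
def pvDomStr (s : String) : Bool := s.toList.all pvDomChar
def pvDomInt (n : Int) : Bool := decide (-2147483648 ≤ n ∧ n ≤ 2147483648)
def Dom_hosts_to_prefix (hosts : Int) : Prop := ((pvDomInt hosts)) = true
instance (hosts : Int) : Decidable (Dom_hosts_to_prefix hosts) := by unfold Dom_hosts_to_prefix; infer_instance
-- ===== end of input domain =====

-- B replaces A's doubling while-loop by a closed-form bit_length computation (idiomatic; same values).


-- ===== PORT A =====
-- the while loop of A: doubles size and decrements pfx while size < needed and pfx > 0
def hostsLoop (needed size pfx : Int) : Int :=
  if size < needed ∧ pfx > 0 then hostsLoop needed (size * 2) (pfx - 1) else pfx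
termination_by pfx.toNat
decreasing_by omega

def hosts_to_prefix (hosts : Int) : Int :=
  let needed := if hosts > 0 then hosts + 2 else 0
  let pfx := hostsLoop needed 1 32
  if pfx > 30 then 30 else pfx

-- ===== PORT B =====
def hosts_to_prefix_alt (hosts : Int) : Int :=
  if hosts ≤ 0 then 30
  else
    let k := min (PySem.Int.bitLength (hosts + 1)) 32
    32 - (k : Int)

-- ===== PRECONDITION & SPEC =====
def Spec_hosts_to_prefix (hosts : Int) (out : Int) : Prop := out = hosts_to_prefix_alt hosts
instance (hosts : Int) (out : Int) : Decidable (Spec_hosts_to_prefix hosts out) := by unfold Spec_hosts_to_prefix; infer_instance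

-- ===== CLAIM (what is proved, stated in full; the proofs are below) =====
def Claim_equal_hosts_to_prefix : Prop := ∀ (hosts : Int), Dom_hosts_to_prefix hosts → Spec_hosts_to_prefix hosts (hosts_to_prefix hosts)

-- ===== LEMMAS AND PROOFS =====

-- running A's loop: if d is the least number of doublings making size reach needed, and d ≤ m,
-- the loop stops with pfx = m - d
theorem hostsLoop_run (d : Nat) :
    ∀ (m : Nat) (needed size : Int), d ≤ m →
      needed ≤ size * 2 ^ d → (∀ e : Nat, e < d → size * 2 ^ e < needed) →
      hostsLoop needed size (m : Int) = (m : Int) - (d : Int) := by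
  induction d with
  | zero =>
    intro m needed size _ hle _
    rw [hostsLoop]
    simp only [pow_zero, mul_one] at hle
    have : ¬ (size < needed ∧ (m : Int) > 0) := by omega
    rw [if_neg this]; simp
  | succ d ih =>
    intro m needed size hdm hle hlt
    have h0 : size * 2 ^ 0 < needed := hlt 0 (Nat.succ_pos d)
    simp only [pow_zero, mul_one] at h0
    rw [hostsLoop]
    have hcond : size < needed ∧ (m : Int) > 0 := ⟨h0, by omega⟩
    simp only [hcond, and_self, if_true]
    have hm : 1 ≤ m := Nat.le_trans (Nat.succ_le_succ (Nat.zero_le d)) hdm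
    have hcast : (m : Int) - 1 = ((m - 1 : Nat) : Int) := by omega
    rw [hcast, ih (m - 1) needed (size * 2) (by omega)
      (by rw [mul_assoc, ← pow_succ']; exact hle)
      (fun e he => by rw [mul_assoc, ← pow_succ']; exact hlt (e + 1) (by omega))]
    omega

theorem hosts_to_prefix_spec : Claim_equal_hosts_to_prefix := by
  intro hosts hdom
  unfold Spec_hosts_to_prefix hosts_to_prefix hosts_to_prefix_alt
  have hdom' : -2147483648 ≤ hosts ∧ hosts ≤ 2147483648 := by
    simpa [Dom_hosts_to_prefix, pvDomInt] using hdom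
  by_cases hpos : hosts > 0
  · -- hosts ≥ 1: A's loop returns 32 - bitLength (hosts+1), already ≤ 30
    simp only [hpos, if_true, if_neg (by omega : ¬ hosts ≤ 0)]
    set n : Nat := (hosts + 1).toNat with hn
    have hnval : (n : Int) = hosts + 1 := by omega
    have hn2 : 2 ≤ n := by omega
    have hnabs : (hosts + 1).natAbs = n := by omega
    set d := PySem.Int.bitLength (hosts + 1) with hd
    have hlt : n < 2 ^ d := by
      have := PySem.Int.lt_two_pow_bitLength (hosts + 1)
      rwa [hnabs] at this
    have hge : 2 ^ (d - 1) ≤ n := by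
      have := PySem.Int.two_pow_bitLength_le (hosts + 1) (by omega)
      rwa [hnabs] at this
    have hd2 : 2 ≤ d := by
      by_contra h
      interval_cases d <;> omega
    have hd32 : d ≤ 32 := by
      by_contra h
      have h32 : 2 ^ 32 ≤ 2 ^ (d - 1) := Nat.pow_le_pow_right (by norm_num) (by omega)
      have : (2:Nat) ^ 32 = 4294967296 := by norm_num
      omega
    have hrun := hostsLoop_run d 32 (hosts + 2) 1 hd32
      (by have : (n:Int) < 2 ^ d := by exact_mod_cast hlt
          rw [hnval] at this; omega)
      (fun e he => by
        have h1 : 2 ^ e ≤ 2 ^ (d - 1) := Nat.pow_le_pow_right (by norm_num) (by omega)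
        have h2 : (2:Int) ^ e ≤ (n : Int) := by exact_mod_cast Nat.le_trans h1 hge
        rw [hnval] at h2; omega)
    norm_num at hrun
    rw [hrun]
    have : min d 32 = d := by omega
    rw [this]
    have : ¬ ((32 : Int) - d > 30) := by omega
    simp [this]
  · -- hosts ≤ 0: needed = 0, loop does not run, 32 capped to 30
    simp only [hpos, if_false, if_pos (by omega : hosts ≤ 0)]
    rw [hostsLoop]
    norm_num

-- ===== VERDICT (by name: the statement is the Claim_ definition above) =====
-- (verdict theorem hosts_to_prefix_spec is stated above as the only theorem; claim block precedes all proofs)
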